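-- pv_equiv track=rewrite | github.com/sadelover/dompyite | logic/PointNameAnalysis/PointBase.py | get_equip_no
-- ===== SOURCE A (Python) =====
-- def get_equip_no(desc, equip):
--     res = -1
--     lst = list()
--     try:
--         equipIdx = desc.find(equip)
--         idx = equipIdx - 1
--         while idx >= 0:
--             if desc[idx].isdigit():
--                 lst.append(desc[idx])
--                 idx -= 1
--             else:
--                 break
--         lst.reverse()
--         res = int(str("".join(lst)))
--     except:
--         pass
--     return res
-- ===== SOURCE B (Python) =====
-- def get_equip_no(desc, equip):
--     i = desc.find(equip)
--     if i < 0: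
--         return -1
--     prefix = desc[:i]
--     stripped = prefix.rstrip('0123456789')
--     run = prefix[len(stripped):]
--     return int(run) if run else -1
-- ===== Notes on version B (the rewrite author's own statement) =====
-- stated objective: simpler
-- what changed: Replaced the manual backward character loop with append/reverse and try/except int('') by slicing the prefix before the first match, rstrip-ing trailing digits to isolate the digit run, and an explicit early return when there is no match or no run.
import Mathlib
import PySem

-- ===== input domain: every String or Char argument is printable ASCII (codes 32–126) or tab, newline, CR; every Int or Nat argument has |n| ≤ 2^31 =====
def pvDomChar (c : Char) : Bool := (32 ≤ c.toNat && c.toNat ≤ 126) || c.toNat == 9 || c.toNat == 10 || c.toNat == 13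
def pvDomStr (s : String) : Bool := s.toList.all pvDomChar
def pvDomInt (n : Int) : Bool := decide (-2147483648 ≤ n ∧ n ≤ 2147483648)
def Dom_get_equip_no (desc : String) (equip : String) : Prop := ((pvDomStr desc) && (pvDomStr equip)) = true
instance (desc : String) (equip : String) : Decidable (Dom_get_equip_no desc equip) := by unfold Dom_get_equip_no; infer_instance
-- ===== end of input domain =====

-- B replaces A's backward index loop + list reversal + try/except with slice, rstrip of digits and
-- explicit early returns (objective: simpler); return values agree on all inputs.

-- ===== PORT A =====
-- the while loop: fuel n+1 reads desc[n]; started at equipIdx.toNat it first reads idx = equipIdx-1,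
-- exactly A's loop; characters are appended (lst.append) and the list reversed afterwards, as in A.
def pvDigitScan (desc : List Char) : Nat → List Char → Option (List Char)
  | 0, lst => some lst
  | n+1, lst =>
    match PySem.List.pyGet? desc (n : Int) with
    | none => none                                   -- IndexError (unreachable here), caught by except
    | some c => if PySem.Chars.isdigit c then pvDigitScan desc n (lst ++ [c]) else some lst

def get_equip_no (desc : String) (equip : String) : Int :=
  let equipIdx := PySem.Str.find desc equip
  match pvDigitScan desc.toList equipIdx.toNat [] with
  | none => -1                                       -- except: res stays -1
  | some lst => (PySem.Int.ofStr? (String.ofList lst.reverse)).getD (-1)  -- int(''.join(lst)); ValueError → -1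

-- ===== PORT B =====
def get_equip_no_alt (desc : String) (equip : String) : Int :=
  let i := PySem.Str.find desc equip
  if i < 0 then -1
  else
    let pre := PySem.List.slice desc.toList none (some i)      -- desc[:i]
    -- prefix.rstrip('0123456789') ported by hand (exact: drop trailing chars belonging to the set)
    let stripped := (pre.reverse.dropWhile (fun c => (['0','1','2','3','4','5','6','7','8','9'].contains c))).reverse
    let run := pre.drop stripped.length                        -- prefix[len(stripped):]
    if run = [] then -1 else (PySem.Int.ofStr? (String.ofList run)).getD (-1)

-- ===== PRECONDITION & SPEC =====
def Spec_get_equip_no (desc : String) (equip : String) (out : Int) : Prop := out = get_equip_no_alt desc equip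
instance (desc : String) (equip : String) (out : Int) : Decidable (Spec_get_equip_no desc equip out) := by unfold Spec_get_equip_no; infer_instance

-- ===== CLAIM (what is proved, stated in full; the proofs are below) =====
def Claim_equal_get_equip_no : Prop := ∀ (desc : String) (equip : String), Dom_get_equip_no desc equip → Spec_get_equip_no desc equip (get_equip_no desc equip)

-- ===== LEMMAS AND PROOFS =====

-- A's digit predicate coincides with membership in B's stripped character set.
theorem pv_isdigit_eq (c : Char) :
    PySem.Chars.isdigit c = (['0','1','2','3','4','5','6','7','8','9'].contains c) := by
  show (decide ('0' ≤ c) && decide (c ≤ '9')) = _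
  simp only [List.contains_cons, List.contains_nil, Bool.or_false]
  rcases c with ⟨n, hv⟩
  simp only [Char.le_def, Char.ext_iff, (· == ·), BEq.beq]
  rw [Bool.eq_iff_iff]
  simp only [Bool.and_eq_true, Bool.or_eq_true, decide_eq_true_eq,
    UInt32.le_iff_toNat_le, ← UInt32.toNat_inj]
  show 48 ≤ n.toNat ∧ n.toNat ≤ 57 ↔ n.toNat = 48 ∨ n.toNat = 49 ∨ n.toNat = 50 ∨ n.toNat = 51 ∨ n.toNat = 52 ∨ n.toNat = 53 ∨ n.toNat = 54 ∨ n.toNat = 55 ∨ n.toNat = 56 ∨ n.toNat = 57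
  omega

-- characterisation of A's loop: it collects the maximal trailing digit run of (l.take n), reversed.
theorem pvDigitScan_eq (l : List Char) (n : Nat) (hn : n ≤ l.length) (acc : List Char) :
    pvDigitScan l n acc = some (acc ++ ((l.take n).reverse.takeWhile PySem.Chars.isdigit)) := by
  induction n generalizing acc with
  | zero => simp [pvDigitScan]
  | succ n ih =>
    have hlt : n < l.length := by omega
    have hget : PySem.List.pyGet? l (n : Int) = some l[n] := by
      simp [PySem.List.pyGet?, PySem.List.pyIdx?, hlt]
    have htake : l.take (n+1) = l.take n ++ [l[n]] := by
      rw [List.take_add_one]; simp [List.getElem?_eq_getElem hlt]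
    have hrev : (l.take (n+1)).reverse = l[n] :: (l.take n).reverse := by
      rw [htake]; simp
    rw [pvDigitScan, hget, hrev]
    by_cases hd : PySem.Chars.isdigit l[n]
    · simp [hd, ih (by omega), List.append_assoc]
    · simp [hd]

-- rstrip decomposition: dropping the rstripped length from p leaves the reversed trailing run.
theorem pv_rstrip_run (p : List Char) (d : Char → Bool) :
    p.drop ((p.reverse.dropWhile d).reverse).length = (p.reverse.takeWhile d).reverse := by
  set a := (p.reverse.dropWhile d).reverse with ha
  set b := (p.reverse.takeWhile d).reverse with hb
  have hsplit : a ++ b = p := by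
    rw [ha, hb, ← List.reverse_append, List.takeWhile_append_dropWhile, List.reverse_reverse]
  rw [← hsplit, List.drop_left]

theorem pv_ofStr_tail (run : List Char) :
    (if run = [] then (-1 : Int) else (PySem.Int.ofStr? (String.ofList run)).getD (-1))
      = (PySem.Int.ofStr? (String.ofList run)).getD (-1) := by
  by_cases h : run = []
  · subst h; decide
  · simp [h]

-- ===== VERDICT (by name: the statement is the Claim_ definition above) =====
theorem get_equip_no_spec : Claim_equal_get_equip_no := by
  intro desc equip _
  unfold Spec_get_equip_no get_equip_no get_equip_no_alt
  have hb : -1 ≤ PySem.Str.find desc equip := by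
    simpa using PySem.Chars.neg_one_le_find desc.toList equip.toList
  have hub : PySem.Str.find desc equip ≤ (desc.toList.length : Int) := by
    simpa using PySem.Chars.find_le_length desc.toList equip.toList
  by_cases hneg : PySem.Str.find desc equip < 0
  · have hm1 : PySem.Str.find desc equip = -1 := by omega
    rw [hm1]
    simp [pvDigitScan]
    decide
  · have h0 : 0 ≤ PySem.Str.find desc equip := by omega
    obtain ⟨n, hn⟩ : ∃ n : Nat, PySem.Str.find desc equip = (n : Int) :=
      ⟨(PySem.Str.find desc equip).toNat, (Int.toNat_of_nonneg h0).symm⟩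
    rw [hn] at hub ⊢
    have hnlen : n ≤ desc.toList.length := by exact_mod_cast hub
    rw [if_neg (by omega)]
    have hpre : PySem.List.slice desc.toList none (some (n : Int)) = desc.toList.take n :=
      PySem.List.slice_to_natCast desc.toList n
    simp only [Int.toNat_natCast, hpre, pvDigitScan_eq desc.toList n hnlen [], List.nil_append]
    have hdpred : PySem.Chars.isdigit
        = (fun c => (['0','1','2','3','4','5','6','7','8','9'].contains c)) := funext pv_isdigit_eq
    rw [pv_rstrip_run (desc.toList.take n), pv_ofStr_tail, hdpred]
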